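-- pv_equiv track=rewrite | github.com/ruanchaves/hashformers | beamsearch.py | gather_n_candidates
-- ===== SOURCE A (Python) =====
-- import itertools
--
-- def gather_n_candidates(prob_dict, segmented_data, n=2):
--     character_count = 0
--     guesses = []
--     candidates = [ { 'hypothesis': k, 'score': v, 'characters': k.replace(" ", "") } \
--         for k,v in prob_dict.items() ]
--     candidates = sorted(candidates, key=lambda x: x['characters'])
--     for key, group in itertools.groupby(candidates, key=lambda x:x['characters']):
--         best_guess = sorted(list(group), key=lambda x: x['score'])[0:n]
--         best_guess = [ x['hypothesis'] for x in best_guess ]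
--         character_count += sum([len(x) for x in best_guess])
--         guesses.append(best_guess)
--
--     return guesses, character_count
-- ===== SOURCE B (Python) =====
-- def gather_n_candidates(prob_dict, segmented_data, n=2):
--     # Online selection: one pass over prob_dict keeping, per spaceless key, a
--     # bounded buffer of the n lowest-scored hypotheses (stable insertion, then
--     # truncate); no sort of the candidates and no per-group sort at the end.
--     best = {}
--     for k, v in prob_dict.items():
--         c = k.replace(" ", "")
--         buf = best.setdefault(c, [])
--         i = 0
--         while i < len(buf) and buf[i][0] <= v:
--             i += 1
--         buf.insert(i, (v, k))
--         del buf[n:]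
--     guesses = [[h for _, h in best[c]] for c in sorted(best)]
--     return guesses, sum(len(h) for g in guesses for h in g)
-- ===== Notes on version B (the rewrite author's own statement) =====
-- stated objective: alternative
-- what changed: B replaces A's sort-all-candidates + groupby + per-group sort pipeline with a single online pass that keeps, per spaceless key, a bounded stable-sorted buffer of the n lowest-scored hypotheses (insert-then-truncate), then emits the buffers in sorted key order; only the distinct keys are ever sorted.
-- outside the precondition, e.g. on gather_n_candidates({'a b': 1, 'ab': 2}, [], -1): A returns ([['a b']], 3), B returns ([[]], 0)
import Mathlib
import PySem

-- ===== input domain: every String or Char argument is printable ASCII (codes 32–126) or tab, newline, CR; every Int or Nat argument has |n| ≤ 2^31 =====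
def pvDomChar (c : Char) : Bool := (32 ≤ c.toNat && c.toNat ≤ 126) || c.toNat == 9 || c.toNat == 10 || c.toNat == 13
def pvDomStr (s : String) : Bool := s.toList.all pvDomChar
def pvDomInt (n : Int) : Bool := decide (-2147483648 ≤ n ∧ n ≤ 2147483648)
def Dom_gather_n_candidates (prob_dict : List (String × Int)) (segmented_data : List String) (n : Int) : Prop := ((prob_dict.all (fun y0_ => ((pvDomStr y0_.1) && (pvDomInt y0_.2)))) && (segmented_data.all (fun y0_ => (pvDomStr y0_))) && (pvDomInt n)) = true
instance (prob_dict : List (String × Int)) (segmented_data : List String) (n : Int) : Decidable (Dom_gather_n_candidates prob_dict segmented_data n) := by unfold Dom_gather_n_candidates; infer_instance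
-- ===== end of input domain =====

-- B replaces A's sort+groupby+per-group-sort pipeline with one streaming pass keeping a
-- bounded buffer of the n lowest-scored hypotheses per spaceless key; 'alternative' objective.


-- ===== PORT A =====
-- hand port of itertools.groupby (PySem has no groupby): maximal runs of equal keys,
-- each yielded as (key, list(group)); exact for the list-of-groups use A makes of it
def pyGroupby {α κ : Type} [BEq κ] (key : α → κ) : List α → List (κ × List α)
  | [] => []
  | x :: xs =>
    (key x, x :: xs.takeWhile (fun y => key y == key x)) ::
      pyGroupby key (xs.dropWhile (fun y => key y == key x))
termination_by l => l.length
decreasing_by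
  simp_wf
  have := List.length_dropWhile_le (fun y => key y == key x) xs
  omega

def gather_n_candidates (prob_dict : List (String × Int)) (segmented_data : List String) (n : Int) : List (List String) × Int :=
  -- candidate dicts {'hypothesis','score','characters'} become triples in that key order
  let candidates := prob_dict.map (fun kv => (kv.1, kv.2, PySem.Str.replace kv.1 " " ""))
  let candidates := PySem.List.sorted candidates (fun x => x.2.2)
  let st := (pyGroupby (fun x => x.2.2) candidates).foldl
    (fun (st : Int × List (List String)) kg =>
      let best_guess := PySem.List.slice (PySem.List.sorted kg.2 (fun x => x.2.1)) (some 0) (some n)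
      let best_guess := best_guess.map (fun x => x.1)
      (st.1 + (best_guess.map (fun x => PySem.Str.len x)).sum, st.2 ++ [best_guess]))
    ((0 : Int), ([] : List (List String)))
  (st.2, st.1)

-- ===== PORT B =====
-- stable bounded insertion: place (v,k) after every buffered entry whose score is ≤ v
def pvInsertLE (v : Int) (k : String) : List (Int × String) → List (Int × String)
  | [] => [(v, k)]
  | (s, h) :: t => if s ≤ v then (s, h) :: pvInsertLE v k t else (v, k) :: (s, h) :: t

def gather_n_candidates_alt (prob_dict : List (String × Int)) (segmented_data : List String) (n : Int) : List (List String) × Int :=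
  let best := prob_dict.foldl
    (fun d kv => d.modify (PySem.Str.replace kv.1 " " "") []
      (fun buf => (pvInsertLE kv.2 kv.1 buf).take n.toNat))
    PySem.Dict.empty
  let guesses := (PySem.List.sorted best.keys (fun c => c)).map
    (fun c => (best.getD c []).map (fun p => p.2))
  (guesses, (guesses.flatMap (fun g => g.map (fun h => PySem.Str.len h))).sum)

-- ===== PRECONDITION & SPEC =====
-- Pre_ excludes negative n, outside the natural domain of a keep-n-lowest count, where A's
-- [0:n] slice accidentally drops the last |n| candidates of each group instead.
def Pre_gather_n_candidates (prob_dict : List (String × Int)) (segmented_data : List String) (n : Int) : Prop := 0 ≤ n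
instance (prob_dict : List (String × Int)) (segmented_data : List String) (n : Int) : Decidable (Pre_gather_n_candidates prob_dict segmented_data n) := by unfold Pre_gather_n_candidates; infer_instance
def pvWitness_gather_n_candidates : (List (String × Int)) × List String × Int := ([("a b", 1), ("ab", 2), ("c", 0)], ["a b"], 2)

def Spec_gather_n_candidates (prob_dict : List (String × Int)) (segmented_data : List String) (n : Int) (out : List (List String) × Int) : Prop := out = gather_n_candidates_alt prob_dict segmented_data n
instance (prob_dict : List (String × Int)) (segmented_data : List String) (n : Int) (out : List (List String) × Int) : Decidable (Spec_gather_n_candidates prob_dict segmented_data n out) := by unfold Spec_gather_n_candidates; infer_instance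

-- ===== CLAIM (what is proved, stated in full; the proofs are below) =====
def Claim_equal_gather_n_candidates : Prop := ∀ (prob_dict : List (String × Int)) (segmented_data : List String) (n : Int), Dom_gather_n_candidates prob_dict segmented_data n → Pre_gather_n_candidates prob_dict segmented_data n → Spec_gather_n_candidates prob_dict segmented_data n (gather_n_candidates prob_dict segmented_data n)

-- ===== LEMMAS AND PROOFS =====

theorem insertBy_pos {α : Type} (before : α → α → Bool) (x : α) (ys1 ys2 : List α)
    (h1 : ∀ y ∈ ys1, before x y = false) (h2 : ∀ y ∈ ys2, before x y = true) :
    PySem.List.insertBy before x (ys1 ++ ys2) = ys1 ++ x :: ys2 := by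
  induction ys1 with
  | nil =>
    cases ys2 with
    | nil => rfl
    | cons y ys => simp [PySem.List.insertBy, h2 y (by simp)]
  | cons y ys ih =>
    simp [PySem.List.insertBy, h1 y (by simp)]
    exact ih (fun z hz => h1 z (by simp [hz]))

theorem pairwise_filter_split {κ : Type} [LinearOrder κ] (ks : List κ) (c : κ)
    (hp : ks.Pairwise (· < ·)) :
    ks = ks.filter (fun d => decide (d ≤ c)) ++ ks.filter (fun d => decide (c < d)) := by
  induction ks with
  | nil => rfl
  | cons k t ih =>
    rcases List.pairwise_cons.mp hp with ⟨hk, ht⟩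
    by_cases h : k ≤ c
    · simpa [List.filter_cons, h, not_lt.mpr h] using ih ht
    · rw [not_le] at h
      have h1 : t.filter (fun d => decide (d ≤ c)) = [] := by
        apply List.filter_eq_nil_iff.mpr
        intro d hd
        simp [not_le.mpr (lt_trans h (hk d hd))]
      have h2 : t.filter (fun d => decide (c < d)) = t := by
        apply List.filter_eq_self.mpr
        intro d hd
        simp [lt_trans h (hk d hd)]
      simp [h, not_le.mpr h, h1, h2]

theorem flatMap_ite_last {κ α : Type} [LinearOrder κ] [BEq κ] [LawfulBEq κ]
    (ks : List κ) (c : κ) (f : κ → List α) (x : α)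
    (hp : ks.Pairwise (· < ·)) (hle : ∀ d ∈ ks, d ≤ c) (hc : c ∈ ks) :
    ks.flatMap (fun d => f d ++ if c == d then [x] else []) = ks.flatMap f ++ [x] := by
  induction ks with
  | nil => simp at hc
  | cons k t ih =>
    rcases List.pairwise_cons.mp hp with ⟨hk, ht⟩
    by_cases hkc : k = c
    · subst hkc
      have htn : t = [] := by
        cases t with
        | nil => rfl
        | cons d t' =>
          exact absurd (hk d (by simp)) (not_lt.mpr (hle d (by simp)))
      simp [htn]
    · have hct : c ∈ t := by
        rcases List.mem_cons.mp hc with h | h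
        · exact absurd h.symm hkc
        · exact h
      have hbeq : (c == k) = false := by simp [Ne.symm hkc]
      simp only [List.flatMap_cons, hbeq]
      rw [ih ht (fun d hd => hle d (by simp [hd])) hct]
      simp

theorem takeWhile_append_all {α : Type} (p : α → Bool) (l1 l2 : List α)
    (h1 : ∀ y ∈ l1, p y = true) (h2 : ∀ y ∈ l2, p y = false) :
    (l1 ++ l2).takeWhile p = l1 ∧ (l1 ++ l2).dropWhile p = l2 := by
  induction l1 with
  | nil =>
    cases l2 with
    | nil => simp
    | cons y t => simp [h2 y (by simp)]
  | cons y t ih =>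
    have := ih (fun z hz => h1 z (by simp [hz])) 
    simp_all [h1 y (by simp)]

theorem pyGroupby_flatMap {α κ : Type} [LinearOrder κ] [BEq κ] [LawfulBEq κ]
    (ks : List κ) (grp : κ → List α) (key : α → κ)
    (hp : ks.Pairwise (· < ·))
    (hne : ∀ c ∈ ks, grp c ≠ [])
    (hkey : ∀ c ∈ ks, ∀ a ∈ grp c, key a = c) :
    pyGroupby key (ks.flatMap grp) = ks.map (fun c => (c, grp c)) := by
  induction ks with
  | nil => simp [pyGroupby]
  | cons c t ih =>
    rcases List.pairwise_cons.mp hp with ⟨hc, ht⟩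
    obtain ⟨a, g', hg⟩ : ∃ a g', grp c = a :: g' := by
      cases h : grp c with
      | nil => exact absurd h (hne c (by simp))
      | cons a g' => exact ⟨a, g', rfl⟩
    have hka : key a = c := hkey c (by simp) a (by simp [hg])
    have hsp := takeWhile_append_all (fun y => key y == key a) g' (t.flatMap grp)
      (fun y hy => by simp [hka, hkey c (by simp) y (by simp [hg, hy])])
      (fun y hy => by
        rcases List.mem_flatMap.mp hy with ⟨d, hd, hyd⟩
        have : key y = d := hkey d (by simp [hd]) y hyd
        have : key y ≠ key a := by rw [this, hka]; exact ne_of_gt (hc d hd)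
        simp [this])
    simp only [List.flatMap_cons, hg, List.cons_append, pyGroupby]
    rw [show (g' ++ t.flatMap grp).takeWhile (fun y => key y == key a) = g' from hsp.1,
        show (g' ++ t.flatMap grp).dropWhile (fun y => key y == key a) = t.flatMap grp from hsp.2]
    rw [ih ht (fun d hd => hne d (by simp [hd])) (fun d hd => hkey d (by simp [hd]))]
    simp [hg, hka]

theorem foldl_insertBy_map {α β : Type} (before : β → β → Bool) (f : α → β)
    (l : List α) (acc : List α) :
    l.foldl (fun acc x => PySem.List.insertBy before (f x) acc) (acc.map f) =
      (l.foldl (fun acc x => PySem.List.insertBy (fun a b => before (f a) (f b)) x acc) acc).map f := by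
  induction l generalizing acc with
  | nil => rfl
  | cons y t ih =>
    simp only [List.foldl_cons]
    rw [show PySem.List.insertBy before (f y) (acc.map f)
        = (PySem.List.insertBy (fun a b => before (f a) (f b)) y acc).map f from by
      induction acc with
      | nil => rfl
      | cons z zs ihz =>
        by_cases h : before (f y) (f z) = true
        · simp [PySem.List.insertBy, h]
        · simp only [Bool.not_eq_true] at h
          simp [PySem.List.insertBy, h, ihz]]
    exact ih _

theorem sorted_map {α β κ : Type} [LinearOrder κ] (l : List α) (f : α → β) (key : β → κ) :
    PySem.List.sorted (l.map f) key = (PySem.List.sorted l (fun a => key (f a))).map f := by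
  rw [PySem.List.sorted_eq_foldl_insertBy, PySem.List.sorted_eq_foldl_insertBy, List.foldl_map]
  exact foldl_insertBy_map (fun a b => decide (key a < key b)) f l []

theorem sorted_eq_flatMap_groups {α κ : Type} [LinearOrder κ] [BEq κ] [LawfulBEq κ]
    (l : List α) (k : α → κ) :
    PySem.List.sorted l k =
      (PySem.List.sorted (PySem.Set.ofList (l.map k)) (fun c => c)).flatMap
        (fun c => l.filter (fun a => k a == c)) := by
  induction l using List.reverseRecOn with
  | nil => simp [PySem.List.sorted, PySem.Set.ofList]
  | append_singleton l x ih =>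
    set c := k x with hc
    set ks := PySem.List.sorted (PySem.Set.ofList (l.map k)) (fun c => c) with hks
    have hp : ks.Pairwise (· < ·) := PySem.List.sorted_ofList_pairwise_lt _
    set ks1 := ks.filter (fun d => decide (d ≤ c)) with hks1
    set ks2 := ks.filter (fun d => decide (c < d)) with hks2
    have hsplit : ks = ks1 ++ ks2 := pairwise_filter_split ks c hp
    have hL : PySem.List.sorted (l ++ [x]) k
        = PySem.List.insertBy (fun a b => decide (k a < k b)) x (PySem.List.sorted l k) := by
      rw [PySem.List.sorted_eq_foldl_insertBy, PySem.List.sorted_eq_foldl_insertBy,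
        List.foldl_append]
      rfl
    have hgrp : ∀ d, ∀ y ∈ l.filter (fun a => k a == d), k y = d := by
      intro d y hy
      simpa using (List.of_mem_filter hy)
    have hins : PySem.List.insertBy (fun a b => decide (k a < k b)) x (PySem.List.sorted l k)
        = ks1.flatMap (fun d => l.filter (fun a => k a == d)) ++ x ::
          ks2.flatMap (fun d => l.filter (fun a => k a == d)) := by
      rw [ih, hsplit, List.flatMap_append]
      apply insertBy_pos
      · intro y hy
        rcases List.mem_flatMap.mp hy with ⟨d, hd, hyd⟩
        have hyk : k y = d := hgrp d y hyd
        have : d ≤ c := by simpa using (List.mem_filter.mp hd).2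
        simpa [hyk] using this
      · intro y hy
        rcases List.mem_flatMap.mp hy with ⟨d, hd, hyd⟩
        have hyk : k y = d := hgrp d y hyd
        have : c < d := by simpa using (List.mem_filter.mp hd).2
        simpa [hyk] using this
    have hmap : (l ++ [x]).map k = l.map k ++ [c] := by simp [hc]
    have hfilter : ∀ d, (l ++ [x]).filter (fun a => k a == d)
        = l.filter (fun a => k a == d) ++ if c == d then [x] else [] := by
      intro d
      by_cases h : k x = d <;> simp [hc, List.filter_append, h]
    rw [hL, hins, hmap, PySem.Set.ofList_append_singleton]
    by_cases hmem : c ∈ PySem.Set.ofList (l.map k)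
    · rw [PySem.Set.add_of_mem hmem, ← hks]
      have hcks : c ∈ ks := (PySem.List.mem_sorted _ _ _ _).mpr hmem
      have hcks1 : c ∈ ks1 := List.mem_filter.mpr ⟨hcks, by simp⟩
      rw [hsplit, List.flatMap_append]
      have e1 : ks1.flatMap (fun d => (l ++ [x]).filter (fun a => k a == d))
          = ks1.flatMap (fun d => l.filter (fun a => k a == d)) ++ [x] := by
        calc ks1.flatMap (fun d => (l ++ [x]).filter (fun a => k a == d))
            = ks1.flatMap (fun d => l.filter (fun a => k a == d) ++ if c == d then [x] else []) := by
              simp only [hfilter]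
          _ = _ := flatMap_ite_last ks1 c _ x (hp.filter _)
                (fun d hd => by simpa using (List.mem_filter.mp hd).2) hcks1
      have e2 : ks2.flatMap (fun d => (l ++ [x]).filter (fun a => k a == d))
          = ks2.flatMap (fun d => l.filter (fun a => k a == d)) := by
        apply List.flatMap_congr
        intro d hd
        have : c < d := by simpa using (List.mem_filter.mp hd).2
        have : (c == d) = false := by simp [ne_of_lt this]
        simp [hfilter, this]
      rw [e1, e2]
      simp
    · rw [PySem.Set.add_of_not_mem hmem]
      have hnotl : ∀ a ∈ l, (k a == c) = false := by
        intro a ha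
        have : k a ∈ l.map k := List.mem_map_of_mem ha
        have : k a ≠ c := fun h => hmem ((PySem.Set.mem_ofList _ _).mpr (h ▸ this))
        simp [this]
      have hkseq : PySem.List.sorted (PySem.Set.ofList (l.map k) ++ [c]) (fun c => c)
          = ks1 ++ c :: ks2 := by
        apply PySem.List.sorted_eq_of_perm_of_pairwise_lt
        · have h1 : (ks1 ++ c :: ks2).Perm (c :: ks) := by
            rw [hsplit]; exact List.perm_middle
          have h2 : (c :: ks).Perm (c :: PySem.Set.ofList (l.map k)) :=
            (PySem.List.sorted_perm _ _ _).cons c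
          have h3 : (PySem.Set.ofList (l.map k) ++ [c]).Perm (c :: PySem.Set.ofList (l.map k)) :=
            List.perm_append_singleton _ _
          exact (h1.trans h2).trans h3.symm
        · have hne : ∀ d ∈ ks, d ≠ c := by
            intro d hd h
            exact hmem ((PySem.List.mem_sorted _ _ _ _).mp (h ▸ hd))
          apply List.pairwise_append.mpr
          refine ⟨hp.filter _, ?_, ?_⟩
          · apply List.pairwise_cons.mpr
            refine ⟨fun d hd => by simpa using (List.mem_filter.mp hd).2, hp.filter _⟩
          · intro a ha b hb
            have ha' := List.mem_filter.mp ha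
            have halt : a < c := lt_of_le_of_ne (by simpa using ha'.2) (hne a ha'.1)
            rcases List.mem_cons.mp hb with rfl | hb
            · exact halt
            · exact lt_trans halt (by simpa using (List.mem_filter.mp hb).2)
      rw [hkseq, List.flatMap_append, List.flatMap_cons]
      have egc : (l ++ [x]).filter (fun a => k a == c) = [x] := by
        rw [hfilter]
        rw [List.filter_eq_nil_iff.mpr (fun a ha => by simp [hnotl a ha])]
        simp
      have e1 : ks1.flatMap (fun d => (l ++ [x]).filter (fun a => k a == d))
          = ks1.flatMap (fun d => l.filter (fun a => k a == d)) := by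
        apply List.flatMap_congr
        intro d hd
        have hdks : d ∈ ks := (hsplit ▸ List.mem_append_left ks2 hd)
        have : d ≠ c := fun h => hmem ((PySem.List.mem_sorted _ _ _ _).mp (h ▸ hdks))
        have : (c == d) = false := by simp [Ne.symm this]
        simp [hfilter, this]
      have e2 : ks2.flatMap (fun d => (l ++ [x]).filter (fun a => k a == d))
          = ks2.flatMap (fun d => l.filter (fun a => k a == d)) := by
        apply List.flatMap_congr
        intro d hd
        have : c < d := by simpa using (List.mem_filter.mp hd).2
        have : (c == d) = false := by simp [ne_of_lt this]
        simp [hfilter, this]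
      rw [e1, e2, egc]
      simp

-- B-side lemmas: the bounded insertion buffer is take n of the stable sort

theorem pvInsertLE_eq_insertBy (v : Int) (k : String) (buf : List (Int × String)) :
    pvInsertLE v k buf
      = PySem.List.insertBy (fun a b => decide (a.1 < b.1)) (v, k) buf := by
  induction buf with
  | nil => rfl
  | cons p t ih =>
    obtain ⟨s, h⟩ := p
    by_cases hs : s ≤ v
    · simp [pvInsertLE, hs, PySem.List.insertBy, not_lt.mpr hs, ih]
    · simp [pvInsertLE, hs, PySem.List.insertBy, not_le.mp hs]

theorem take_insertBy {α : Type} (b : α → α → Bool) (x : α) :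
    ∀ (l : List α) (m : Nat),
      (PySem.List.insertBy b x (l.take m)).take m = (PySem.List.insertBy b x l).take m := by
  intro l
  induction l with
  | nil => intro m; simp
  | cons y t ih =>
    intro m
    cases m with
    | zero => simp
    | succ m' =>
      by_cases hb : b x y = true
      · cases m' with
        | zero => simp [PySem.List.insertBy, hb]
        | succ m'' =>
          simp [PySem.List.insertBy, hb, List.take_take]
      · simp only [Bool.not_eq_true] at hb
        simp [PySem.List.insertBy, hb, ih m']

theorem foldl_take_insertBy_aux {α : Type} (b : α → α → Bool) (m : Nat) (l : List α) :
    ∀ acc : List α,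
      l.foldl (fun a x => (PySem.List.insertBy b x a).take m) (acc.take m)
        = (l.foldl (fun a x => PySem.List.insertBy b x a) acc).take m := by
  induction l with
  | nil => intro acc; rfl
  | cons y t ih =>
    intro acc
    simp only [List.foldl_cons]
    rw [take_insertBy b y acc m]
    exact ih (PySem.List.insertBy b y acc)

theorem foldl_take_insertBy {α : Type} (b : α → α → Bool) (m : Nat) (l : List α) :
    l.foldl (fun a x => (PySem.List.insertBy b x a).take m) []
      = (l.foldl (fun a x => PySem.List.insertBy b x a) []).take m := by
  have h := foldl_take_insertBy_aux b m l []
  simpa using h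

theorem getD_foldl_modify_list {κ β γ : Type} [BEq κ] [LawfulBEq κ] [DecidableEq κ]
    (l : List γ) (key : γ → κ) (g : γ → List β → List β) :
    ∀ (d : PySem.Dict κ (List β)) (c : κ),
      (l.foldl (fun d x => d.modify (key x) [] (g x)) d).getD c []
        = (l.filter (fun x => key x == c)).foldl (fun buf x => g x buf) (d.getD c []) := by
  induction l with
  | nil => intro d c; rfl
  | cons x t ih =>
    intro d c
    simp only [List.foldl_cons, List.filter_cons]
    by_cases h : key x = c
    · subst h
      simp only [beq_self_eq_true, if_pos rfl, List.foldl_cons]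
      rw [ih, PySem.Dict.getD_modify]
      simp
    · have hb : (key x == c) = false := by simp [h]
      simp only [hb, Bool.false_eq_true, if_false]
      rw [ih, PySem.Dict.getD_modify]
      simp [Ne.symm h]

theorem foldl_ins_swap (l : List (String × Int)) :
    (l.map (fun kv => (kv.2, kv.1))).foldl
        (fun a x => PySem.List.insertBy (fun a b => decide (a.1 < b.1)) x a) []
      = (PySem.List.sorted l (fun kv => kv.2)).map (fun kv => (kv.2, kv.1)) := by
  have h1 : (l.map (fun kv => (kv.2, kv.1))).foldl
        (fun a x => PySem.List.insertBy (fun a b => decide (a.1 < b.1)) x a) []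
      = PySem.List.sorted (l.map (fun kv => (kv.2, kv.1))) (fun p => p.1) :=
    (PySem.List.sorted_eq_foldl_insertBy _ _).symm
  rw [h1, sorted_map l (fun kv => (kv.2, kv.1)) (fun p => p.1)]

theorem sum_flatMap_eq {α : Type} (l : List α) (f : α → List Int) :
    (l.flatMap f).sum = (l.map (fun x => (f x).sum)).sum := by
  induction l with
  | nil => rfl
  | cons x t ih => simp [ih]

theorem gather_n_candidates_main (pd : List (String × Int)) (sd : List String) (n : Int)
    (hn : 0 ≤ n) :
    gather_n_candidates pd sd n = gather_n_candidates_alt pd sd n := by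
  have hB : gather_n_candidates_alt pd sd n
      = ((PySem.List.sorted (PySem.Set.ofList (pd.map (fun kv => PySem.Str.replace kv.1 " " ""))) (fun c => c)).map
          (fun c => (PySem.List.slice (PySem.List.sorted (pd.filter (fun kv => PySem.Str.replace kv.1 " " "" == c)) (fun kv => kv.2)) none (some n)).map (fun kv => kv.1)),
         ((PySem.List.sorted (PySem.Set.ofList (pd.map (fun kv => PySem.Str.replace kv.1 " " ""))) (fun c => c)).map
          (fun c => (((PySem.List.slice (PySem.List.sorted (pd.filter (fun kv => PySem.Str.replace kv.1 " " "" == c)) (fun kv => kv.2)) none (some n)).map (fun kv => kv.1)).map (fun h => PySem.Str.len h)).sum)).sum) := by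
    simp only [gather_n_candidates_alt]
    have hkeys : (pd.foldl (fun d kv => d.modify (PySem.Str.replace kv.1 " " "") [] (fun buf => (pvInsertLE kv.2 kv.1 buf).take n.toNat)) PySem.Dict.empty).keys
        = PySem.Set.ofList (pd.map (fun kv => PySem.Str.replace kv.1 " " "")) := by
      have h := PySem.Dict.keys_foldl_modify_key pd (fun kv => PySem.Str.replace kv.1 " " "") ([] : List (Int × String)) (fun _ kv buf => (pvInsertLE kv.2 kv.1 buf).take n.toNat) PySem.Dict.empty
      simpa [PySem.Set.update_nil_left] using h
    have hgetD : ∀ c, (pd.foldl (fun d kv => d.modify (PySem.Str.replace kv.1 " " "") [] (fun buf => (pvInsertLE kv.2 kv.1 buf).take n.toNat)) PySem.Dict.empty).getD c []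
        = ((PySem.List.sorted (pd.filter (fun kv => PySem.Str.replace kv.1 " " "" == c)) (fun kv => kv.2)).map (fun kv => (kv.2, kv.1))).take n.toNat := by
      intro c
      rw [getD_foldl_modify_list pd (fun kv => PySem.Str.replace kv.1 " " "") (fun kv buf => (pvInsertLE kv.2 kv.1 buf).take n.toNat) PySem.Dict.empty c]
      have hempty : (PySem.Dict.empty : PySem.Dict String (List (Int × String))).getD c [] = [] := rfl
      rw [hempty]
      simp only [pvInsertLE_eq_insertBy]
      have hmapfold : (pd.filter (fun kv => PySem.Str.replace kv.1 " " "" == c)).foldl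
            (fun buf kv => (PySem.List.insertBy (fun a b => decide (a.1 < b.1)) (kv.2, kv.1) buf).take n.toNat) []
          = ((pd.filter (fun kv => PySem.Str.replace kv.1 " " "" == c)).map (fun kv => (kv.2, kv.1))).foldl
            (fun buf p => (PySem.List.insertBy (fun a b => decide (a.1 < b.1)) p buf).take n.toNat) [] := by
        rw [List.foldl_map]
      rw [hmapfold]
      rw [foldl_take_insertBy, foldl_ins_swap]
    rw [hkeys]
    simp only [hgetD]
    have hslice : ∀ (l : List (String × Int)), PySem.List.slice l none (some n) = l.take n.toNat :=
      fun l => PySem.List.slice_to l hn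
    simp only [hslice, List.map_take, List.map_map, Function.comp_def]
    rw [sum_flatMap_eq]
    simp [List.map_map, Function.comp_def, List.map_take]
  have hbg : ∀ c, ((PySem.List.slice (PySem.List.sorted ((pd.map (fun kv => (kv.1, kv.2, PySem.Str.replace kv.1 " " ""))).filter (fun a => a.2.2 == c)) (fun x => x.2.1)) (some 0) (some n)).map (fun x => x.1))
      = (PySem.List.slice (PySem.List.sorted (pd.filter (fun kv => PySem.Str.replace kv.1 " " "" == c)) (fun kv => kv.2)) none (some n)).map (fun kv => kv.1) := by
    intro c
    rw [List.filter_map, sorted_map, PySem.List.slice_zero_start]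
    rw [PySem.List.slice_to _ hn, PySem.List.slice_to _ hn]
    simp [List.map_take, List.map_map, Function.comp_def]
  have hp : (PySem.List.sorted (PySem.Set.ofList ((pd.map (fun kv => (kv.1, kv.2, PySem.Str.replace kv.1 " " ""))).map (fun x => x.2.2))) (fun c => c)).Pairwise (· < ·) :=
    PySem.List.sorted_ofList_pairwise_lt _
  have hne : ∀ c ∈ PySem.List.sorted (PySem.Set.ofList ((pd.map (fun kv => (kv.1, kv.2, PySem.Str.replace kv.1 " " ""))).map (fun x => x.2.2))) (fun c => c),
      (pd.map (fun kv => (kv.1, kv.2, PySem.Str.replace kv.1 " " ""))).filter (fun a => a.2.2 == c) ≠ [] := by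
    intro c hc hnil
    have hc' : c ∈ pd.map (fun kv => PySem.Str.replace kv.1 " " "") := by
      simpa [PySem.List.mem_sorted, PySem.Set.mem_ofList, List.map_map, Function.comp_def] using hc
    obtain ⟨kv, hkv, rfl⟩ := List.mem_map.mp hc'
    have hmem : (kv.1, kv.2, PySem.Str.replace kv.1 " " "") ∈
        (pd.map (fun kv => (kv.1, kv.2, PySem.Str.replace kv.1 " " ""))).filter (fun a => a.2.2 == PySem.Str.replace kv.1 " " "") :=
      List.mem_filter.mpr ⟨List.mem_map_of_mem hkv, by simp⟩
    rw [hnil] at hmem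
    simp at hmem
  have hkey : ∀ c ∈ PySem.List.sorted (PySem.Set.ofList ((pd.map (fun kv => (kv.1, kv.2, PySem.Str.replace kv.1 " " ""))).map (fun x => x.2.2))) (fun c => c),
      ∀ a ∈ (pd.map (fun kv => (kv.1, kv.2, PySem.Str.replace kv.1 " " ""))).filter (fun a => a.2.2 == c), a.2.2 = c := by
    intro c _ a ha
    simpa using (List.mem_filter.mp ha).2
  have hA : gather_n_candidates pd sd n
      = ((PySem.List.sorted (PySem.Set.ofList (pd.map (fun kv => PySem.Str.replace kv.1 " " ""))) (fun c => c)).map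
          (fun c => (PySem.List.slice (PySem.List.sorted (pd.filter (fun kv => PySem.Str.replace kv.1 " " "" == c)) (fun kv => kv.2)) none (some n)).map (fun kv => kv.1)),
         ((PySem.List.sorted (PySem.Set.ofList (pd.map (fun kv => PySem.Str.replace kv.1 " " ""))) (fun c => c)).map
          (fun c => (((PySem.List.slice (PySem.List.sorted (pd.filter (fun kv => PySem.Str.replace kv.1 " " "" == c)) (fun kv => kv.2)) none (some n)).map (fun kv => kv.1)).map (fun h => PySem.Str.len h)).sum)).sum) := by
    simp only [gather_n_candidates]
    rw [sorted_eq_flatMap_groups (pd.map (fun kv => (kv.1, kv.2, PySem.Str.replace kv.1 " " ""))) (fun x => x.2.2)]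
    rw [pyGroupby_flatMap _ _ _ hp hne hkey]
    rw [List.foldl_map]
    simp only [hbg]
    rw [PySem.List.foldl_prod_mk
      (f := fun (s : Int) c => s + (((PySem.List.slice (PySem.List.sorted (pd.filter (fun kv => PySem.Str.replace kv.1 " " "" == c)) (fun kv => kv.2)) none (some n)).map (fun kv => kv.1)).map (fun h => PySem.Str.len h)).sum)
      (g := fun (s : List (List String)) c => s ++ [(PySem.List.slice (PySem.List.sorted (pd.filter (fun kv => PySem.Str.replace kv.1 " " "" == c)) (fun kv => kv.2)) none (some n)).map (fun kv => kv.1)])]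
    rw [PySem.List.foldl_append_singleton_eq_map, PySem.List.foldl_add]
    simp [List.map_map, Function.comp_def]
  rw [hA, hB]

-- ===== VERDICT (by name: the statement is the Claim_ definition above) =====
theorem gather_n_candidates_spec : Claim_equal_gather_n_candidates := by
  intro pd sd n _ hn
  exact gather_n_candidates_main pd sd n hn
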